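-- pv_equiv track=rewrite | github.com/AtomTools/Multi-tools | utils/theme.py | yelloworange
-- ===== SOURCE A (Python) =====
-- def yelloworange(text):
--     faded = ""
--     green = 255
--     for line in text.splitlines():
--         faded += f"\033[38;2;255;{green};0m{line}\033[0m\n"
--         if green > 125:
--             green -= 20
--             if green < 125:
--                 green = 125
--     return faded
-- ===== SOURCE B (Python) =====
-- GRADIENT = (255, 235, 215, 195, 175, 155, 135)
--
-- def yelloworange(text):
--     lines = text.splitlines()
--     head = [f"\033[38;2;255;{g};0m{line}\033[0m\n" for g, line in zip(GRADIENT, lines)]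
--     tail = [f"\033[38;2;255;125;0m{line}\033[0m\n" for line in lines[len(GRADIENT):]]
--     return "".join(head + tail)
-- ===== Notes on version B (the rewrite author's own statement) =====
-- stated objective: alternative
-- what changed: Replaces the mutable decrement-and-clamp green state machine with a precomputed 7-entry gradient lookup table: B zips the first lines with the fixed tuple (255,235,...,135), renders all remaining lines with the constant 125, and joins the two staged lists; no per-line arithmetic or state remains.
import Mathlib
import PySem

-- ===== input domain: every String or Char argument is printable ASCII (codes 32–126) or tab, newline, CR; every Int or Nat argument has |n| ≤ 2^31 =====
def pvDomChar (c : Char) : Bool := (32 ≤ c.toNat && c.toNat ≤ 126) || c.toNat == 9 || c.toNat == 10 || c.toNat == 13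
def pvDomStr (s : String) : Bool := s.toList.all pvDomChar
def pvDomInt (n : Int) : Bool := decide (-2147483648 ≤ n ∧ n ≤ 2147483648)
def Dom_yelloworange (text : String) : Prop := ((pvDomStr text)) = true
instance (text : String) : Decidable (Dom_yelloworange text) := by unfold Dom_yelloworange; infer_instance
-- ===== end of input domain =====

-- B replaces A's mutable decrement-and-clamp state machine with a fixed 7-entry gradient
-- lookup table zipped against the first lines plus a constant-125 pass over the rest
-- (objective: alternative; same return value).

-- ===== PORT A =====
-- state (faded, green); loop body appends the coded line, then decrements green with clamp
def yelloworange (text : String) : String :=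
  ((PySem.Str.splitlines text).foldl
    (fun (st : String × Int) line =>
      (st.1 ++ "\x1b[38;2;255;" ++ PySem.Int.toStr st.2 ++ ";0m" ++ line ++ "\x1b[0m\n",
       if st.2 > 125 then
         (if st.2 - 20 < 125 then (125 : Int) else st.2 - 20)
       else st.2))
    ("", 255)).1

-- ===== PORT B =====
def yelloworangeGradient : List Int := [255, 235, 215, 195, 175, 155, 135]

def yelloworange_alt (text : String) : String :=
  let lines := PySem.Str.splitlines text
  let head := (yelloworangeGradient.zip lines).map
    (fun p => "\x1b[38;2;255;" ++ PySem.Int.toStr p.1 ++ ";0m" ++ p.2 ++ "\x1b[0m\n")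
  let tail := (lines.drop yelloworangeGradient.length).map
    (fun line => "\x1b[38;2;255;125;0m" ++ line ++ "\x1b[0m\n")
  PySem.Str.join "" (head ++ tail)

-- ===== PRECONDITION & SPEC =====
def Spec_yelloworange (text : String) (out : String) : Prop := out = yelloworange_alt text
instance (text : String) (out : String) : Decidable (Spec_yelloworange text out) := by unfold Spec_yelloworange; infer_instance

-- ===== CLAIM (what is proved, stated in full; the proofs are below) =====
def Claim_equal_yelloworange : Prop := ∀ (text : String), Dom_yelloworange text → Spec_yelloworange text (yelloworange text)

-- ===== LEMMAS AND PROOFS =====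

-- gs is the chain of greens A will traverse starting at g, ending pinned at 125
def yoChain (gs : List Int) (g : Int) : Prop :=
  match gs with
  | [] => g = 125
  | a :: rest =>
      g = a ∧ yoChain rest (if a > 125 then (if a - 20 < 125 then (125 : Int) else a - 20) else a)

theorem yo_join_cons (x : String) (xs : List String) :
    PySem.Str.join "" (x :: xs) = x ++ PySem.Str.join "" xs := by
  cases xs with
  | nil => simp [PySem.Str.join]
  | cons y ys =>
      apply String.toList_injective
      simp [PySem.Str.toList_join, PySem.Chars.join_cons_cons]

theorem yo_loop (ls : List String) (acc : String) (gs : List Int) (g : Int)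
    (hg : yoChain gs g) :
    (ls.foldl
      (fun (st : String × Int) line =>
        (st.1 ++ "\x1b[38;2;255;" ++ PySem.Int.toStr st.2 ++ ";0m" ++ line ++ "\x1b[0m\n",
         if st.2 > 125 then
           (if st.2 - 20 < 125 then (125 : Int) else st.2 - 20)
         else st.2))
      (acc, g)).1
    = acc ++ PySem.Str.join ""
        ((gs.zip ls).map
          (fun p => "\x1b[38;2;255;" ++ PySem.Int.toStr p.1 ++ ";0m" ++ p.2 ++ "\x1b[0m\n")
         ++ (ls.drop gs.length).map
          (fun line => "\x1b[38;2;255;125;0m" ++ line ++ "\x1b[0m\n")) := by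
  induction ls generalizing acc gs g with
  | nil => simp [PySem.Str.join]
  | cons l rest ih =>
      rw [List.foldl_cons]
      cases gs with
      | nil =>
          obtain rfl : g = 125 := hg
          rw [show (((acc, (125:Int)).1 ++ "\x1b[38;2;255;" ++ PySem.Int.toStr (acc, (125:Int)).2 ++ ";0m" ++ l ++ "\x1b[0m\n",
              if (acc, (125:Int)).2 > 125 then (if (acc, (125:Int)).2 - 20 < 125 then (125:Int) else (acc, (125:Int)).2 - 20) else (acc, (125:Int)).2))
            = (acc ++ "\x1b[38;2;255;" ++ PySem.Int.toStr 125 ++ ";0m" ++ l ++ "\x1b[0m\n", (125:Int)) from by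
              simp]
          rw [ih _ ([] : List Int) 125 rfl]
          simp only [List.zip_nil_left, List.map_nil, List.nil_append, List.length_nil,
            List.drop_zero, List.map_cons]
          rw [yo_join_cons]
          have h125 : PySem.Int.toStr 125 = "125" := by decide
          simp [h125, String.append_assoc]
      | cons a gs' =>
          obtain ⟨rfl, hrest⟩ := hg
          rw [ih _ gs' _ hrest]
          simp only [List.zip_cons_cons, List.map_cons, List.length_cons, List.drop_succ_cons,
            List.cons_append]
          rw [yo_join_cons]
          simp [String.append_assoc]

-- ===== VERDICT (by name: the statement is the Claim_ definition above) =====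
theorem yelloworange_spec : Claim_equal_yelloworange := by
  intro text _
  unfold Spec_yelloworange yelloworange yelloworange_alt
  rw [yo_loop (PySem.Str.splitlines text) "" yelloworangeGradient 255
    (by simp [yoChain, yelloworangeGradient])]
  simp
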